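-- pv_equiv track=rewrite | github.com/captainys/TOWNSEMU | scripts/insertlicense.py | RemoveLicenseLines
-- ===== SOURCE A (Python) =====
-- def RemoveLicenseLines(text):
-- 	if text[0].startswith("/* LICENSE>>"):
-- 		ripped=[]
-- 		foundEnd=False
-- 		for s in text:
-- 			if True==foundEnd:
-- 				ripped.append(s)
-- 			if s.startswith("<< LICENSE */"):
-- 				foundEnd=True
-- 		if True==foundEnd:
-- 			return ripped
-- 	return text;
-- ===== SOURCE B (Python) =====
-- def RemoveLicenseLines(text):
-- 	if text[0].startswith("/* LICENSE>>"):
-- 		for i, s in enumerate(text):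
-- 			if s.startswith("<< LICENSE */"):
-- 				return text[i+1:]
-- 	return text
-- ===== Notes on version B (the rewrite author's own statement) =====
-- stated objective: simpler
-- what changed: Replaces A's boolean-flag accumulation pass (append every line once an end marker was seen) with locating the first end-marker line and returning the list suffix after it.
import Mathlib
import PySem

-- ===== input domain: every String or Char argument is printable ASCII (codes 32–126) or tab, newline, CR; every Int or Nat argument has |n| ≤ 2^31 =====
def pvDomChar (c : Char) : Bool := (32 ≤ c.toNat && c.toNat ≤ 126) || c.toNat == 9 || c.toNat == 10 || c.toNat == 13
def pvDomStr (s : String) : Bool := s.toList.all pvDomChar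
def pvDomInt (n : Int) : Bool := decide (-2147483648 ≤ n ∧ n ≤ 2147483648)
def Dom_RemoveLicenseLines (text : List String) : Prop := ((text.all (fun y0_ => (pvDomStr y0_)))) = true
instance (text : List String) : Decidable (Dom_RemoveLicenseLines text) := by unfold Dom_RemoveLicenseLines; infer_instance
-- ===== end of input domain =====

-- B replaces A's boolean-flag accumulation pass with find-first-end-marker-then-take-suffix (objective: simpler).


-- ===== PORT A =====
-- one loop step of A: append s when foundEnd already holds, then set foundEnd on the end marker
def pvStepA (st : List String × Bool) (s : String) : List String × Bool :=
  let st1 := if st.2 = true then (st.1 ++ [s], st.2) else st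
  if PySem.Str.startswith s "<< LICENSE */" then (st1.1, true) else st1

def RemoveLicenseLines (text : List String) : List String :=
  -- text[0]: Pre_ guarantees text ≠ [], so headD never sees its default
  if PySem.Str.startswith (text.headD "") "/* LICENSE>>" then
    let r := text.foldl pvStepA ([], false)
    if r.2 = true then r.1 else text
  else text

-- ===== PORT B =====
-- Source B's loop: the suffix after the first end-marker line, if any
def pvAfterEnd : List String → Option (List String)
  | [] => none
  | s :: rest => if PySem.Str.startswith s "<< LICENSE */" then some rest else pvAfterEnd rest

def RemoveLicenseLines_alt (text : List String) : List String :=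
  if PySem.Str.startswith (text.headD "") "/* LICENSE>>" then
    match pvAfterEnd text with
    | some r => r
    | none => text
  else text

-- ===== PRECONDITION & SPEC =====
-- A evaluates text[0]: it raises IndexError on the empty list
def Pre_RemoveLicenseLines (text : List String) : Prop := text ≠ []
instance (text : List String) : Decidable (Pre_RemoveLicenseLines text) := by unfold Pre_RemoveLicenseLines; infer_instance
def pvWitness_RemoveLicenseLines : List String := ["/* LICENSE>> foo", "<< LICENSE */", "code"]

def Spec_RemoveLicenseLines (text : List String) (out : List String) : Prop := out = RemoveLicenseLines_alt text
instance (text : List String) (out : List String) : Decidable (Spec_RemoveLicenseLines text out) := by unfold Spec_RemoveLicenseLines; infer_instance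

-- ===== CLAIM (what is proved, stated in full; the proofs are below) =====
def Claim_equal_RemoveLicenseLines : Prop := ∀ (text : List String), Dom_RemoveLicenseLines text → Pre_RemoveLicenseLines text → Spec_RemoveLicenseLines text (RemoveLicenseLines text)

-- ===== LEMMAS AND PROOFS =====

-- once foundEnd is set, A's loop appends every remaining line
lemma foldl_stepA_true (l : List String) (acc : List String) :
    l.foldl pvStepA (acc, true) = (acc ++ l, true) := by
  induction l generalizing acc with
  | nil => simp
  | cons s rest ih =>
      simp only [List.foldl_cons, pvStepA]
      split <;> simp [ih]

-- before foundEnd is set, A's loop is exactly "find the first end marker, then append the suffix"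
lemma foldl_stepA_false (l : List String) (acc : List String) :
    l.foldl pvStepA (acc, false) =
      match pvAfterEnd l with
      | some r => (acc ++ r, true)
      | none => (acc, false) := by
  induction l generalizing acc with
  | nil => simp [pvAfterEnd]
  | cons s rest ih =>
      simp only [List.foldl_cons, pvAfterEnd, pvStepA]
      by_cases h : PySem.Str.startswith s "<< LICENSE */" = true <;>
        simp only [show ("<< LICENSE */".toList) = ['<','<',' ','L','I','C','E','N','S','E',' ','*','/'] from rfl, PySem.Str.startswith_eq] at h
      · simp [h, foldl_stepA_true]
      · simp [h, ih]

-- ===== VERDICT (by name: the statement is the Claim_ definition above) =====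
theorem RemoveLicenseLines_spec : Claim_equal_RemoveLicenseLines := by
  intro text _ _
  unfold Spec_RemoveLicenseLines RemoveLicenseLines RemoveLicenseLines_alt
  by_cases hg : PySem.Str.startswith (text.headD "") "/* LICENSE>>" = true <;>
    simp only [show ("/* LICENSE>>".toList) = ['/','*',' ','L','I','C','E','N','S','E','>','>'] from rfl, PySem.Str.startswith_eq, List.headD_eq_head?_getD] at hg
  · simp only [List.headD_eq_head?_getD, hg, foldl_stepA_false]
    cases h : pvAfterEnd text <;> simp
  · simp [hg]
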